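-- pv_equiv track=rewrite | github.com/daniel-reich/ubiquitous-fiesta | ehyZvt6AJF4rKFfXT_9.py | uncensor
-- ===== SOURCE A (Python) =====
-- def uncensor(txt, vowels):
--     new_txt = ''
--     v_list = [v for v in vowels]
--
--     for x in txt:
--         if x == '*':
--             new_txt += v_list.pop(0)
--         else:
--             new_txt += x
--
--     return new_txt
-- ===== SOURCE B (Python) =====
-- def uncensor(txt, vowels):
--     # split-then-interleave: tokenize on '*' and stitch the vowels between segments
--     parts = txt.split('*')
--     v = list(vowels)
--     out = [parts[0]]
--     for vw, seg in zip(v, parts[1:]):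
--         out.append(vw)
--         out.append(seg)
--     return ''.join(out)
-- ===== Notes on version B (the rewrite author's own statement) =====
-- stated objective: alternative
-- what changed: B replaces A's character-by-character scan with pop(0) from a vowel list by a split('*')-then-interleave pass that zips the vowels with the segments and joins once (avoiding quadratic string += and pop(0) shifting).
-- outside the precondition, e.g. on uncensor('a*b*c', 'i'): A raises IndexError, B returns 'aib'
import Mathlib
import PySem

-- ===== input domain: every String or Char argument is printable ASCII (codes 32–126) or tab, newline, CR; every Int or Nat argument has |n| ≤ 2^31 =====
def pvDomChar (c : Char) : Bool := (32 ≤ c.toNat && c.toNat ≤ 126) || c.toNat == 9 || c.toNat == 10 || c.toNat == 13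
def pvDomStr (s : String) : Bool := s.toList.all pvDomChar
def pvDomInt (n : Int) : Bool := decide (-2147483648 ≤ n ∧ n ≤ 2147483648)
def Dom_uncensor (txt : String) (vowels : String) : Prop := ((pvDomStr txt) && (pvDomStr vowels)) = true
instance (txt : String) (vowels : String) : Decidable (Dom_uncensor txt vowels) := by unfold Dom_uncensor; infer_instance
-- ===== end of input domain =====

-- B replaces A's char-by-char scan with pop(0) by a split('*')-then-interleave pass (alternative decomposition, same result on inputs where A returns).


-- ===== PORT A =====
-- one step of A's for-loop: state = (new_txt, v_list); pop(0) on an empty list raises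
-- IndexError in Python — that input is excluded by Pre_uncensor, the port leaves the state.
def uncensorStep (st : List Char × List Char) (x : Char) : List Char × List Char :=
  if x = '*' then
    match st.2 with
    | [] => st                      -- Python raises IndexError here (outside Pre_)
    | v :: vs => (st.1 ++ [v], vs)
  else (st.1 ++ [x], st.2)

def uncensor (txt : String) (vowels : String) : String :=
  String.mk (txt.toList.foldl uncensorStep ([], vowels.toList)).1

-- ===== PORT B =====
-- port of txt.split('*') (str.split with a one-char separator), exact on every input
def splitStar : List Char → List (List Char)
  | [] => [[]]
  | x :: xs =>
    let r := splitStar xs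
    if x = '*' then [] :: r
    else
      match r with
      | [] => [[x]]                 -- unreachable: splitStar is never empty
      | h :: t => (x :: h) :: t

def uncensor_alt (txt : String) (vowels : String) : String :=
  let parts := splitStar txt.toList
  let v := vowels.toList
  let out := (List.zip v parts.tail).foldl (fun acc p => acc ++ p.1 :: p.2) (parts.headD [])
  String.mk out

-- ===== PRECONDITION & SPEC =====
-- Pre_ excludes exactly the inputs where '*' outnumbers the vowels: there A's pop(0) raises IndexError.
def Pre_uncensor (txt : String) (vowels : String) : Prop :=
  txt.toList.count '*' ≤ vowels.toList.length
instance (txt : String) (vowels : String) : Decidable (Pre_uncensor txt vowels) := by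
  unfold Pre_uncensor; infer_instance
def pvWitness_uncensor : String × String := ("why d*d the ch*cken cross the r*ad?", "aeiou")
def Spec_uncensor (txt : String) (vowels : String) (out : String) : Prop := out = uncensor_alt txt vowels
instance (txt : String) (vowels : String) (out : String) : Decidable (Spec_uncensor txt vowels out) := by unfold Spec_uncensor; infer_instance

-- ===== CLAIM (what is proved, stated in full; the proofs are below) =====
def Claim_equal_uncensor : Prop := ∀ (txt : String) (vowels : String), Dom_uncensor txt vowels → Pre_uncensor txt vowels → Spec_uncensor txt vowels (uncensor txt vowels)

-- ===== LEMMAS AND PROOFS =====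

-- recursion-style description of A's loop result (no accumulator)
def aCore : List Char → List Char → List Char
  | [], _ => []
  | x :: xs, vs =>
    if x = '*' then
      match vs with
      | [] => aCore xs []
      | v :: vs' => v :: aCore xs vs'
    else x :: aCore xs vs

theorem foldl_uncensorStep (cs : List Char) :
    ∀ (acc vs : List Char), (cs.foldl uncensorStep (acc, vs)).1 = acc ++ aCore cs vs := by
  induction cs with
  | nil => intro acc vs; simp [aCore]
  | cons x xs ih =>
    intro acc vs
    by_cases hx : x = '*'
    · cases vs with
      | nil => simp [uncensorStep, hx, aCore, ih]
      | cons v vs' => simp [uncensorStep, hx, aCore, ih]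
    · simp [uncensorStep, hx, aCore, ih]

theorem splitStar_ne_nil (cs : List Char) : splitStar cs ≠ [] := by
  cases cs with
  | nil => simp [splitStar]
  | cons x xs =>
    simp only [splitStar]
    by_cases hx : x = '*'
    · simp [hx]
    · simp only [hx, if_false]
      cases splitStar xs <;> simp

-- recursion-style description of B's interleaving loop
def zipFlat : List Char → List (List Char) → List Char
  | _, [] => []
  | [], _ :: _ => []
  | v :: vs, s :: ss => v :: s ++ zipFlat vs ss

theorem foldl_zip (vs : List Char) : ∀ (segs : List (List Char)) (acc : List Char),
    (List.zip vs segs).foldl (fun acc p => acc ++ p.1 :: p.2) acc = acc ++ zipFlat vs segs := by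
  induction vs with
  | nil => intro segs acc; cases segs <;> simp [zipFlat]
  | cons v vs ih =>
    intro segs acc
    cases segs with
    | nil => simp [zipFlat]
    | cons s ss =>
      simp only [List.zip_cons_cons, List.foldl_cons]
      rw [ih]
      simp [zipFlat]

-- the core equivalence: interleaving the split with the vowels equals A's scan
theorem inter_eq_aCore (cs : List Char) : ∀ (vs : List Char),
    cs.count '*' ≤ vs.length →
    (splitStar cs).headD [] ++ zipFlat vs (splitStar cs).tail = aCore cs vs := by
  induction cs with
  | nil => intro vs _; simp [splitStar, zipFlat, aCore]
  | cons x xs ih =>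
    intro vs hcount
    obtain ⟨h, t, ht⟩ : ∃ h t, splitStar xs = h :: t := by
      cases hsx : splitStar xs with
      | nil => exact absurd hsx (splitStar_ne_nil xs)
      | cons h t => exact ⟨h, t, rfl⟩
    by_cases hx : x = '*'
    · subst hx
      cases vs with
      | nil =>
        simp only [List.count_cons_self, List.length_nil] at hcount
        omega
      | cons v vs' =>
        have h' : xs.count '*' ≤ vs'.length := by
          simp only [List.count_cons_self, List.length_cons] at hcount; omega
        have key := ih vs' h'
        rw [ht] at key
        simp only [List.headD_cons, List.tail_cons] at key
        simp [splitStar, ht, zipFlat, aCore, key]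
    · have h' : xs.count '*' ≤ vs.length := by
        rw [List.count_cons] at hcount; omega
      have key := ih vs h'
      rw [ht] at key
      simp only [List.headD_cons, List.tail_cons] at key
      simp [splitStar, hx, ht, aCore, key]

-- ===== VERDICT (by name: the statement is the Claim_ definition above) =====
theorem uncensor_spec : Claim_equal_uncensor := by
  intro txt vowels _ hpre
  unfold Spec_uncensor uncensor uncensor_alt
  dsimp only
  rw [foldl_uncensorStep, foldl_zip, List.nil_append,
      inter_eq_aCore txt.toList vowels.toList hpre]
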